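-- pv_equiv track=rewrite | github.com/alxwen711/contestSubmissionArchive | codeforces/live contests/2023-3/887/a copy.py | solve
-- ===== SOURCE A (Python) =====
-- def f(n,k,ar,x):
--     higher = n
--     for i in range(k):
--         while x < ar[higher-1]:
--             higher -= 1
--             if higher == 0: break
--         x -= higher
--         if higher == 0: break
--     return x
--
-- def solve(n,k,ar):
--     low = 1
--     high = k*n+ar[-1]
--     while high-low > 1:
--         mid = (low+high)//2
--         if f(n,k,ar,mid) == 0: low = mid
--         else: high = mid
--     if f(n,k,ar,low) == 1: return low
--     return high
-- ===== SOURCE B (Python) =====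
-- def f(n, k, ar, x):
--     h, rem = n, k
--     while rem > 0:
--         best = 0
--         for j in range(h):
--             if ar[j] <= x:
--                 best = j + 1
--         h = best
--         if h == 0:
--             return x
--         t = min(rem, (x - ar[h - 1]) // h + 1)
--         x -= t * h
--         rem -= t
--     return x
--
-- def solve(n, k, ar):
--     low, gap = 1, k * n + ar[-1] - 1
--     while gap > 1:
--         half = gap // 2
--         if f(n, k, ar, low + half) == 0:
--             low += half
--             gap -= half
--         else:
--             gap = half
--     return low if f(n, k, ar, low) == 1 else low + gap
-- ===== Notes on version B (the rewrite author's own statement) =====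
-- stated objective: alternative
-- what changed: f's k-iteration subtraction simulation is replaced by batching over level changes: the current level is recomputed by a forward scan and one floor division covers all equal 'higher' subtractions at that level, so f's cost is independent of k (but pays up to O(n) per level change); the binary search is restated over (low, gap) with mid = low + gap//2 instead of (low, high).
-- outside the precondition, e.g. on solve(0, 3, [-3, 7, 4]): A returns 2, B returns 1; on solve(3, 1, [5, 6]): A raises IndexError, B raises IndexError
import Mathlib
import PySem

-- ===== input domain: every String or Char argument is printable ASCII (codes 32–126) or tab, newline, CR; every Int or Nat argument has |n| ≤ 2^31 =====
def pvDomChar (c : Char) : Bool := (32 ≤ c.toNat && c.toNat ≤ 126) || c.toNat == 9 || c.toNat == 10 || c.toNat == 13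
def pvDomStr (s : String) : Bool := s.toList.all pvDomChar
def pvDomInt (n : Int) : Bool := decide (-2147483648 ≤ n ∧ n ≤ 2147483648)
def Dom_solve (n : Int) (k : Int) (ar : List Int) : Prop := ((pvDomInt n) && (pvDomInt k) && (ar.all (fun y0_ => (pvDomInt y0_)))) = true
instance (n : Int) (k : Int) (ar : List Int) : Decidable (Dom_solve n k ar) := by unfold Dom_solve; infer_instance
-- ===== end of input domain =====

-- B replaces f's per-iteration simulation by arithmetic batching over level changes (the
-- current level is recomputed by a forward scan, and one floor division covers all equal
-- subtractions at that level, making f's cost independent of k), and runs the binary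
-- search on (low, gap) instead of (low, high); objective: alternative.

-- ===== PORT A =====

-- inner 'while x < ar[higher-1]: higher -= 1; if higher == 0: break' of A's f.
-- The Nat argument is fuel making the loop total (h.toNat always suffices: h drops by 1
-- per pass and the loop stops at h = 0); a failed lookup (IndexError in Python, excluded
-- by Pre_solve) exits the loop.
def dropAF (ar : List Int) (x : Int) : Nat → Int → Int
  | 0, h => h
  | f + 1, h =>
    if h ≤ 0 then h else
    match PySem.List.pyGet? ar (h - 1) with
    | none => h
    | some v => if x < v then dropAF ar x f (h - 1) else h

def dropA (ar : List Int) (x : Int) (h : Int) : Int := dropAF ar x h.toNat h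

-- 'for i in range(k)' body of A's f, fuel = number of remaining iterations
def loopA (ar : List Int) : Nat → Int → Int → Int
  | 0, _, x => x
  | i + 1, h, x =>
    let h' := dropA ar x h
    let x' := x - h'
    if h' = 0 then x' else loopA ar i h' x'

def fA (n : Int) (k : Int) (ar : List Int) (x : Int) : Int := loopA ar k.toNat n x

-- the 'while high-low > 1' binary-search loop of A's solve; fuel (high-low).toNat
-- suffices since the gap shrinks by at least 1 per pass and the loop stops at gap ≤ 1
def searchAF (n : Int) (k : Int) (ar : List Int) : Nat → Int → Int → Int
  | 0, low, high => if fA n k ar low = 1 then low else high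
  | f + 1, low, high =>
    if high - low > 1 then
      if fA n k ar (PySem.Int.floordiv (low + high) 2) = 0 then
        searchAF n k ar f (PySem.Int.floordiv (low + high) 2) high
      else searchAF n k ar f low (PySem.Int.floordiv (low + high) 2)
    else if fA n k ar low = 1 then low else high

def searchA (n : Int) (k : Int) (ar : List Int) (low : Int) (high : Int) : Int :=
  searchAF n k ar (high - low).toNat low high

def solve (n : Int) (k : Int) (ar : List Int) : Int :=
  match PySem.List.pyGet? ar (-1) with
  | none => 0   -- Python raises IndexError (ar = []); excluded by Pre_solve
  | some last => searchA n k ar 1 (k * n + last)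

-- ===== PORT B =====

-- Source B's forward scan 'best = 0; for j in range(h): if ar[j] <= x: best = j + 1'.
-- pyGetD with default 0 is exact here: Pre_solve keeps every scanned index in range.
def levelB (ar : List Int) (x : Int) (h : Int) : Int :=
  (PySem.List.pyRange 0 h 1).foldl
    (fun best j => if PySem.List.pyGetD ar j 0 ≤ x then j + 1 else best) 0

-- 'while rem > 0' loop of Source B's f; each pass batches t = min(rem, (x-ar[h-1])//h + 1)
-- equal subtractions, so rem drops by ≥ 1 per pass and fuel rem.toNat suffices.
def loopB (ar : List Int) : Nat → Int → Int → Int → Int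
  | 0, x, _, _ => x
  | f + 1, x, h, rem =>
    if rem ≤ 0 then x else
    let h' := levelB ar x h
    if h' = 0 then x else
    let t := min rem (PySem.Int.floordiv (x - PySem.List.pyGetD ar (h' - 1) 0) h' + 1)
    loopB ar f (x - t * h') h' (rem - t)

def fB (n : Int) (k : Int) (ar : List Int) (x : Int) : Int := loopB ar k.toNat x n k

-- 'while gap > 1' loop of Source B's solve, over (low, gap); fuel as in searchAF
def searchBF (n : Int) (k : Int) (ar : List Int) : Nat → Int → Int → Int
  | 0, low, gap => if fB n k ar low = 1 then low else low + gap
  | f + 1, low, gap =>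
    if gap > 1 then
      if fB n k ar (low + PySem.Int.floordiv gap 2) = 0 then
        searchBF n k ar f (low + PySem.Int.floordiv gap 2) (gap - PySem.Int.floordiv gap 2)
      else searchBF n k ar f low (PySem.Int.floordiv gap 2)
    else if fB n k ar low = 1 then low else low + gap

def solve_alt (n : Int) (k : Int) (ar : List Int) : Int :=
  match PySem.List.pyGet? ar (-1) with
  | none => 0   -- Python raises IndexError (ar = []); excluded by Pre_solve
  | some last => searchBF n k ar (k * n + last - 1).toNat 1 (k * n + last - 1)

-- ===== PRECONDITION & SPEC =====
-- Pre_solve admits 1 ≤ n ≤ len(ar), and also any n when k ≤ 0 (f never touches ar then);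
-- it excludes, for k > 0 only, n > len(ar) (A raises IndexError) and n ≤ 0, where the
-- result of A's inner while, driven by Python's negative-index wraparound into ar, is an
-- accident of A's implementation (usually an IndexError, occasionally a returned value).
def Pre_solve (n : Int) (k : Int) (ar : List Int) : Prop :=
  (1 ≤ n ∧ n ≤ ar.length) ∨ (k ≤ 0 ∧ ar ≠ [])

instance (n : Int) (k : Int) (ar : List Int) : Decidable (Pre_solve n k ar) := by
  unfold Pre_solve; infer_instance

def pvWitness_solve : Int × Int × List Int := (2, 3, [1, 4])

def Spec_solve (n : Int) (k : Int) (ar : List Int) (out : Int) : Prop := out = solve_alt n k ar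
instance (n : Int) (k : Int) (ar : List Int) (out : Int) : Decidable (Spec_solve n k ar out) := by unfold Spec_solve; infer_instance

-- ===== CLAIM (what is proved, stated in full; the proofs are below) =====
def Claim_equal_solve : Prop := ∀ (n : Int) (k : Int) (ar : List Int), Dom_solve n k ar → Pre_solve n k ar → Spec_solve n k ar (solve n k ar)

-- ===== LEMMAS AND PROOFS =====

theorem pyGet?_ne_none (ar : List Int) (i : Int) (h0 : 0 ≤ i) (h1 : i < ar.length) :
    PySem.List.pyGet? ar i ≠ none := by
  rw [PySem.List.pyGet?_of_nonneg ar h0]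
  simp only [ne_eq, List.getElem?_eq_none_iff, not_le]
  omega

theorem dropAF_zero (ar : List Int) (x : Int) (f : Nat) : dropAF ar x f 0 = 0 := by
  cases f <;> simp [dropAF]

-- one-step top unfolding of A's inner drop loop
theorem dropA_step (ar : List Int) (x h v : Int) (hpos : 0 < h)
    (hget : PySem.List.pyGet? ar (h - 1) = some v) :
    dropA ar x h = if x < v then dropA ar x (h - 1) else h := by
  unfold dropA
  obtain ⟨t, ht⟩ : ∃ t, h.toNat = t + 1 := ⟨h.toNat - 1, by omega⟩
  rw [ht, dropAF]
  simp only [if_neg (by omega : ¬ h ≤ 0), hget]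
  by_cases hlt : x < v
  · simp only [if_pos hlt]
    congr 1
    omega
  · simp only [if_neg hlt]

-- Source B's forward scan computes exactly A's downward drop result
theorem levelB_eq_dropA (ar : List Int) (x : Int) :
    ∀ (m : Nat), (m : Int) ≤ ar.length → levelB ar x (m : Int) = dropA ar x (m : Int) := by
  intro m
  induction m with
  | zero =>
    intro _
    simp [levelB, PySem.List.pyRange_one_eq_nil, dropA, dropAF]
  | succ m ih =>
    intro hlen
    have hmlt : (m : Int) < ar.length := by push_cast at hlen; omega
    have hget : PySem.List.pyGet? ar ((m : Int) + 1 - 1) = some ar[m] := by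
      rw [(show (m : Int) + 1 - 1 = (m : Int) by ring)]
      rw [PySem.List.pyGet?_of_nonneg ar (by omega : (0 : Int) ≤ (m : Int))]
      simp only [Int.toNat_natCast]
      exact List.getElem?_eq_getElem (by omega)
    have hgetD : PySem.List.pyGetD ar (m : Int) 0 = ar[m] := by
      rw [PySem.List.pyGetD_eq_getElem ar (0 : Int) (by omega : (0 : Int) ≤ (m : Int)) hmlt]
      simp
    rw [(show ((m + 1 : Nat) : Int) = (m : Int) + 1 by push_cast; ring)]
    rw [dropA_step ar x _ ar[m] (by omega) hget]
    unfold levelB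
    rw [PySem.List.pyRange_one_succ_right (by omega : (0 : Int) ≤ (m : Int)), List.foldl_append]
    simp only [List.foldl_cons, List.foldl_nil, hgetD]
    by_cases hle : ar[m] ≤ x
    · simp only [if_pos hle, if_neg (by omega : ¬ x < ar[m])]
    · simp only [if_neg hle, if_pos (by omega : x < ar[m])]
      have := ih (by push_cast at hlen ⊢; omega)
      rw [(show (m : Int) + 1 - 1 = (m : Int) by ring)]
      exact this

theorem levelB_eq_dropA' (ar : List Int) (x h : Int) (h0 : 0 ≤ h) (hlen : h ≤ ar.length) :
    levelB ar x h = dropA ar x h := by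
  have := levelB_eq_dropA ar x h.toNat (by omega)
  rwa [(show ((h.toNat : Nat) : Int) = h by omega)] at this

-- specification of the inner drop loop under valid indices and sufficient fuel
theorem dropAF_spec (ar : List Int) (x : Int) :
    ∀ (f : Nat) (h : Int), 0 < h → h ≤ ar.length → h.toNat ≤ f →
    0 ≤ dropAF ar x f h ∧ dropAF ar x f h ≤ h ∧
    (dropAF ar x f h = 0 ∨
      ∃ v, PySem.List.pyGet? ar (dropAF ar x f h - 1) = some v ∧ v ≤ x) := by
  intro f
  induction f with
  | zero => intro h hpos _ hf; omega
  | succ f ih =>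
    intro h hpos hlen hf
    rw [dropAF]
    simp only [if_neg (by omega : ¬ h ≤ 0)]
    cases hget : PySem.List.pyGet? ar (h - 1) with
    | none => exact absurd hget (pyGet?_ne_none ar (h - 1) (by omega) (by omega))
    | some v =>
      by_cases hlt : x < v
      · simp only [if_pos hlt]
        by_cases h1 : 0 < h - 1
        · have := ih (h - 1) h1 (by omega) (by omega)
          exact ⟨by omega, by omega, this.2.2⟩
        · rw [(show h - 1 = 0 by omega), dropAF_zero]
          omega
      · simp only [if_neg hlt]
        exact ⟨by omega, le_refl _, Or.inr ⟨v, hget, by omega⟩⟩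

theorem dropA_spec (ar : List Int) (x h : Int) (hpos : 0 < h) (hlen : h ≤ ar.length) :
    0 ≤ dropA ar x h ∧ dropA ar x h ≤ h ∧
    (dropA ar x h = 0 ∨
      ∃ v, PySem.List.pyGet? ar (dropA ar x h - 1) = some v ∧ v ≤ x) :=
  dropAF_spec ar x h.toNat h hpos hlen (le_refl _)

theorem dropA_noop (ar : List Int) (x h v : Int) (hpos : 0 < h)
    (hget : PySem.List.pyGet? ar (h - 1) = some v) (hge : v ≤ x) :
    dropA ar x h = h := by
  rw [dropA_step ar x h v hpos hget]
  simp [if_neg (by omega : ¬ x < v)]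

theorem loopB_rem_nonpos (ar : List Int) (f : Nat) (x h rem : Int) (hr : rem ≤ 0) :
    loopB ar f x h rem = x := by
  cases f with
  | zero => rfl
  | succ f => rw [loopB]; simp [if_pos hr]

-- while x ≥ ar[h-1] keeps holding, A's outer loop just subtracts h each iteration:
-- s such iterations from state (m', x' - h) land at (m' - s, x' - h - s*h).
theorem loopA_stay (ar : List Int) (h v : Int) (hpos : 0 < h)
    (hget : PySem.List.pyGet? ar (h - 1) = some v) :
    ∀ (s m' : Nat) (x' : Int), v ≤ x' →
      (s : Int) ≤ PySem.Int.floordiv (x' - v) h → s ≤ m' →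
      loopA ar m' h (x' - h) = loopA ar (m' - s) h (x' - h - s * h) := by
  intro s
  induction s with
  | zero => intro m' x' _ _ _; simp
  | succ s ih =>
    intro m' x' hvx hsle hsm
    have hmul : ((s : Int) + 1) * h ≤ x' - v := by
      have h2 := (PySem.Int.le_floordiv_iff_mul_le (a := x' - v) (b := h) (q := (s : Int) + 1) hpos).1
        (by push_cast at hsle ⊢; omega)
      omega
    have hge : v ≤ x' - h := by nlinarith
    obtain ⟨m'', rfl⟩ : ∃ m'', m' = m'' + 1 := ⟨m' - 1, by omega⟩
    have hdrop : dropA ar (x' - h) h = h := dropA_noop ar (x' - h) h v hpos hget hge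
    rw [loopA]
    simp only [hdrop, if_neg (by omega : ¬ h = 0)]
    have hfd : ((s : Int)) ≤ PySem.Int.floordiv ((x' - h) - v) h :=
      (PySem.Int.le_floordiv_iff_mul_le (a := (x' - h) - v) (b := h) (q := (s : Int)) hpos).2
        (by nlinarith)
    have ih' := ih m'' (x' - h) hge hfd (by omega)
    rw [ih']
    congr 1
    · omega
    · push_cast; ring

-- the main equivalence of the two f loops
theorem loopA_eq_loopB (ar : List Int) :
    ∀ (m : Nat) (f : Nat) (h x : Int), m ≤ f → 0 < h → h ≤ ar.length →
      loopA ar m h x = loopB ar f x h (m : Int) := by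
  intro m
  induction m using Nat.strong_induction_on with
  | _ m IH =>
    intro f h x hmf hpos hlen
    match m with
    | 0 =>
      rw [loopA]
      exact (loopB_rem_nonpos ar f x h _ (by simp)).symm
    | Nat.succ m' =>
      obtain ⟨f', rfl⟩ : ∃ f', f = f' + 1 := ⟨f - 1, by omega⟩
      rw [loopB]
      simp only [if_neg (show ¬ ((m' + 1 : Nat) : Int) ≤ 0 by push_cast; omega)]
      rw [levelB_eq_dropA' ar x h (by omega) hlen]
      obtain ⟨hd0, hdh, hrest⟩ := dropA_spec ar x h hpos hlen
      by_cases hz : dropA ar x h = 0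
      · simp only [if_pos hz]
        rw [loopA]
        simp [hz]
      · simp only [if_neg hz]
        rcases hrest with hc | ⟨v, hget, hvx⟩
        · exact absurd hc hz
        have hpos' : 0 < dropA ar x h := by omega
        have hgetD : PySem.List.pyGetD ar (dropA ar x h - 1) 0 = v := by
          have h0 : (0 : Int) ≤ dropA ar x h - 1 := by omega
          rw [PySem.List.pyGet?_of_nonneg ar h0] at hget
          have hbound : (dropA ar x h - 1).toNat < ar.length := by
            by_contra hc
            rw [List.getElem?_eq_none_iff.mpr (by omega)] at hget
            exact absurd hget (by simp)
          rw [PySem.List.pyGetD_eq_getElem ar (0 : Int) h0 (by omega)]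
          rw [List.getElem?_eq_getElem hbound] at hget
          exact (Option.some.injEq _ _).mp hget
        have hfd0 : 0 ≤ PySem.Int.floordiv (x - v) (dropA ar x h) :=
          (PySem.Int.le_floordiv_iff_mul_le (q := 0) hpos').2 (by omega)
        simp only [hgetD]
        generalize hT : min ((↑(m' + 1) : Int))
            (PySem.Int.floordiv (x - v) (dropA ar x h) + 1) = T
        have ht1 : (1 : Int) ≤ T := by
          rw [← hT]
          exact le_min (by push_cast; omega) (by omega)
        have htm : T ≤ ((m' + 1 : Nat) : Int) := by rw [← hT]; exact min_le_left _ _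
        have hTfd : T - 1 ≤ PySem.Int.floordiv (x - v) (dropA ar x h) := by
          have := min_le_right ((↑(m' + 1) : Int))
            (PySem.Int.floordiv (x - v) (dropA ar x h) + 1)
          omega
        rw [loopA]
        simp only [if_neg hz]
        have hstay := loopA_stay ar (dropA ar x h) v hpos' hget (T - 1).toNat m' x hvx
          (by rw [(show (((T - 1).toNat : Nat) : Int) = T - 1 by omega)]; exact hTfd)
          (by push_cast at htm; omega)
        rw [hstay]
        have hxeq : x - dropA ar x h - (((T - 1).toNat : Nat) : Int) * dropA ar x h
            = x - T * dropA ar x h := by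
          rw [(show (((T - 1).toNat : Nat) : Int) = T - 1 by omega)]; ring
        rw [hxeq]
        rcases eq_or_lt_of_le htm with hteq | htlt
        · rw [(show m' - (T - 1).toNat = 0 by push_cast at hteq; omega)]
          rw [(show ((m' + 1 : Nat) : Int) - T = 0 by push_cast at hteq ⊢; omega)]
          rw [loopA, loopB_rem_nonpos ar f' _ _ 0 (le_refl _)]
        · have := IH (m' - (T - 1).toNat) (by omega) f' (dropA ar x h)
            (x - T * dropA ar x h) (by omega) hpos' (by omega)
          rw [this]
          congr 1
          push_cast at htlt ⊢
          omega

theorem fA_eq_fB (n k : Int) (ar : List Int) (x : Int)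
    (h : (0 < n ∧ n ≤ ar.length) ∨ k ≤ 0) : fA n k ar x = fB n k ar x := by
  unfold fA fB
  by_cases hk : k ≤ 0
  · rw [(show k.toNat = 0 by omega), loopA, loopB_rem_nonpos ar 0 x n k hk]
  · obtain ⟨hpos, hlen⟩ : 0 < n ∧ n ≤ ar.length := by tauto
    have := loopA_eq_loopB ar k.toNat k.toNat n x (le_refl _) hpos hlen
    rw [(show ((k.toNat : Nat) : Int) = k by omega)] at this
    exact this

-- A's midpoint (low+high)//2 is low + gap//2 for gap = high - low
theorem mid_eq (low high : Int) :
    PySem.Int.floordiv (low + high) 2 = low + PySem.Int.floordiv (high - low) 2 := by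
  rw [PySem.Int.floordiv_eq_ediv_of_pos (by omega), PySem.Int.floordiv_eq_ediv_of_pos (by omega)]
  omega

theorem searchAF_eq_searchBF (n k : Int) (ar : List Int)
    (h : (0 < n ∧ n ≤ ar.length) ∨ k ≤ 0) :
    ∀ (f : Nat) (low high : Int),
      searchAF n k ar f low high = searchBF n k ar f low (high - low) := by
  intro f
  induction f with
  | zero =>
    intro low high
    rw [searchAF, searchBF, fA_eq_fB n k ar low h]
    congr 1
    omega
  | succ f ih =>
    intro low high
    rw [searchAF, searchBF]
    by_cases hgt : high - low > 1
    · simp only [if_pos hgt, mid_eq low high, fA_eq_fB n k ar _ h]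
      by_cases hf0 : fB n k ar (low + PySem.Int.floordiv (high - low) 2) = 0
      · simp only [if_pos hf0, ih]
        congr 1
        ring
      · simp only [if_neg hf0, ih]
        congr 1
        ring
    · simp only [if_neg hgt, fA_eq_fB n k ar low h]
      congr 1
      omega

-- ===== VERDICT (by name: the statement is the Claim_ definition above) =====
theorem solve_spec : Claim_equal_solve := by
  intro n k ar _hdom hpre
  have hne : ar ≠ [] := by
    rcases hpre with ⟨h1, h2⟩ | ⟨_, hne⟩
    · intro h; subst h; simp at h2; omega
    · exact hne
  have hcase : (0 < n ∧ n ≤ ar.length) ∨ k ≤ 0 := by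
    rcases hpre with ⟨h1, h2⟩ | ⟨hk, _⟩
    · exact Or.inl ⟨by omega, h2⟩
    · exact Or.inr hk
  unfold Spec_solve solve solve_alt
  cases hget : PySem.List.pyGet? ar (-1) with
  | none =>
    exfalso
    rw [PySem.List.pyGet?_neg_one] at hget
    simp [List.getLast?_eq_none_iff, hne] at hget
  | some last =>
    show searchA n k ar 1 (k * n + last)
      = searchBF n k ar (k * n + last - 1).toNat 1 (k * n + last - 1)
    unfold searchA
    exact searchAF_eq_searchBF n k ar hcase (k * n + last - 1).toNat 1 (k * n + last)
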